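-- pv_equiv track=rewrite | github.com/Crawlerop/cdmatools | x9500_decoder_lib.py | b1tob8_b
-- ===== SOURCE A (Python) =====
-- def b1tob8_b(a, skip=0):
--     bits = []
--
--     for b in a:
--         for i in range(8):
--             binary = (b >> i) & 1
--             bits.append(binary)
--
--     if skip > 0:
--         bits = bits[:-skip]
--
--     return bits
-- ===== SOURCE B (Python) =====
-- # Table-driven rewrite: a precomputed 256-entry LSB-first bit table replaces the inner per-bit loop (same cost).
-- _TABLE = [[(v >> i) & 1 for i in range(8)] for v in range(256)]
--
--
-- def b1tob8_b(a, skip=0):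
--     bits = []
--     for b in a:
--         bits.extend(_TABLE[b & 0xFF])
--     if skip > 0:
--         bits = bits[:-skip]
--     return bits
-- ===== Notes on version B (the rewrite author's own statement) =====
-- stated objective: alternative
-- what changed: B precomputes a constant 256-entry table of each byte value's LSB-first bits and extends the output with one table lookup per element, removing A's inner 8-iteration bit loop; same asymptotic cost.
import Mathlib
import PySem

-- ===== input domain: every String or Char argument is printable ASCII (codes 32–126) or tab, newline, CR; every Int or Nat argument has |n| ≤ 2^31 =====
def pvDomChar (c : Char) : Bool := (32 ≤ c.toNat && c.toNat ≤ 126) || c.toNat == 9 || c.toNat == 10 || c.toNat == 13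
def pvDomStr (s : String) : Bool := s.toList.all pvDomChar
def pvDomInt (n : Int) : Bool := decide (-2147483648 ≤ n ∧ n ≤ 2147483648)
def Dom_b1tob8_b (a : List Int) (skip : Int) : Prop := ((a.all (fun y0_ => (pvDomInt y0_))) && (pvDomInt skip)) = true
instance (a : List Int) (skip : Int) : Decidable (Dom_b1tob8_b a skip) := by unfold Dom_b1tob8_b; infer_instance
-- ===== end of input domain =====

-- B replaces A's inner per-bit loop by one lookup in a precomputed 256-entry bit table (alternative decomposition).

-- ===== PORT A =====
-- inner 'for i in range(8): bits.append((b >> i) & 1)'; outer 'for b in a'; then bits[:-skip] if skip > 0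
def b1tob8_b (a : List Int) (skip : Int) : List Int :=
  let bits := a.foldl (fun bits b =>
    (List.range 8).foldl (fun bits i => bits ++ [PySem.Int.band (b >>> i) 1]) bits) []
  if skip > 0 then PySem.List.slice bits none (some (-skip)) else bits

-- ===== PORT B =====
-- _TABLE = [[(v >> i) & 1 for i in range(8)] for v in range(256)]
def pvTable : List (List Int) :=
  (List.range 256).map (fun (v : Nat) => (List.range 8).map (fun (i : Nat) => PySem.Int.band ((v : Int) >>> i) 1))

-- for b in a: bits.extend(_TABLE[b & 0xFF]); then bits[:-skip] if skip > 0
def b1tob8_b_alt (a : List Int) (skip : Int) : List Int :=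
  let bits := a.foldl (fun bits b => bits ++ pvTable.getD (PySem.Int.band b 255).toNat []) []
  if skip > 0 then PySem.List.slice bits none (some (-skip)) else bits

-- ===== PRECONDITION & SPEC =====
def Spec_b1tob8_b (a : List Int) (skip : Int) (out : List Int) : Prop := out = b1tob8_b_alt a skip
instance (a : List Int) (skip : Int) (out : List Int) : Decidable (Spec_b1tob8_b a skip out) := by unfold Spec_b1tob8_b; infer_instance

-- ===== CLAIM (what is proved, stated in full; the proofs are below) =====
def Claim_equal_b1tob8_b : Prop := ∀ (a : List Int) (skip : Int), Dom_b1tob8_b a skip → Spec_b1tob8_b a skip (b1tob8_b a skip)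

-- ===== LEMMAS AND PROOFS =====

theorem nat_and_255 (n : Nat) : n &&& 255 = n % 256 := by
  have h : (255 : Nat) = 2 ^ 8 - 1 := rfl
  rw [h, Nat.and_two_pow_sub_one_eq_mod]

theorem band255 (b : Int) : PySem.Int.band b 255 = b % 256 := by
  unfold PySem.Int.band
  split_ifs with h1 h2 h3
  · rw [show ((255 : Int).toNat) = 255 from rfl, nat_and_255]; omega
  · exact absurd (by norm_num) h2
  · rw [show ((255 : Int).toNat) = 255 from rfl, Nat.land_comm, nat_and_255]; omega
  · exact absurd (by norm_num) h3

-- masking to the low byte does not change bits 0..7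
theorem maskbit (b : Int) (i : Nat) (h : i < 8) :
    PySem.Int.band (PySem.Int.band b 255 >>> i) 1 = PySem.Int.band (b >>> i) 1 := by
  rw [band255, PySem.Int.band_one, PySem.Int.band_one, PySem.Int.mod_eq_emod_of_pos,
      PySem.Int.mod_eq_emod_of_pos, Int.shiftRight_eq_div_pow, Int.shiftRight_eq_div_pow]
  · interval_cases i <;> norm_num <;> omega
  · omega
  · omega

-- the table row fetched for b is exactly the block A's inner loop appends for b
theorem row_eq (b : Int) : pvTable.getD (PySem.Int.band b 255).toNat [] =
    (List.range 8).map (fun (i : Nat) => PySem.Int.band (b >>> i) 1) := by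
  have hb : PySem.Int.band b 255 = b % 256 := band255 b
  have hlt : (PySem.Int.band b 255).toNat < 256 := by rw [hb]; omega
  have hc : (((PySem.Int.band b 255).toNat : Nat) : Int) = PySem.Int.band b 255 := by
    rw [hb]; omega
  unfold pvTable
  rw [List.getD_eq_getElem?_getD, List.getElem?_map, List.getElem?_range hlt]
  simp only [Option.map_some, Option.getD_some, hc]
  exact List.map_congr_left (fun i hi => maskbit b i (List.mem_range.mp hi))

-- ===== VERDICT (by name: the statement is the Claim_ definition above) =====
-- the two accumulation loops build the same bit list
theorem fold_eq (l : List Int) : ∀ (acc : List Int),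
    l.foldl (fun bits b =>
      (List.range 8).foldl (fun bits i => bits ++ [PySem.Int.band (b >>> i) 1]) bits) acc
    = l.foldl (fun bits b => bits ++ pvTable.getD (PySem.Int.band b 255).toNat []) acc := by
  induction l with
  | nil => intro acc; rfl
  | cons x xs ih =>
      intro acc
      rw [List.foldl_cons, List.foldl_cons, ih,
          PySem.List.foldl_append_singleton_eq_map, row_eq]

theorem b1tob8_b_spec : Claim_equal_b1tob8_b := by
  intro a skip _
  unfold Spec_b1tob8_b b1tob8_b b1tob8_b_alt
  rw [fold_eq]
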